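-- pv_equiv track=rewrite | github.com/InQUIZitor-Engineering-Project/Inquizitor | backend/app/infrastructure/exporting/export.py | latex_with_math
-- ===== SOURCE A (Python) =====
-- _LATEX_MAP = {
--     "&": r"\&",
--     "%": r"\%",
--     "$": r"\$",
--     "#": r"\#",
--     "_": r"\_",
--     "{": r"\{",
--     "}": r"\}",
--     "~": r"\textasciitilde{}",
--     "^": r"\textasciicircum{}",
--     "\\": r"\textbackslash{}",
-- }
--
-- def latex_escape(text: str) -> str:
--     return "".join(_LATEX_MAP.get(ch, ch) for ch in text)
--
-- def latex_with_math(text: str) -> str: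
--     """
--     Escape LaTeX special chars, but keep math segments written as $...$ or $$...$$
--     intact so they are rendered in math mode.
--     """
--     if text is None:
--         return ""
--
--     s = str(text)
--     out: list[str] = []
--     i = 0
--     n = len(s)
--
--     while i < n:
--         if s.startswith("$$", i):
--             end = s.find("$$", i + 2)
--             if end == -1:
--                 # no closing $$ - treat the rest as plain text
--                 out.append(latex_escape(s[i:]))
--                 break
--             inner = s[i + 2 : end]
--             out.append("$$" + inner + "$$")
--             i = end + 2
--         elif s[i] == "$":
--             end = s.find("$", i + 1)
--             if end == -1:
--                 out.append(latex_escape(s[i:]))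
--                 break
--             inner = s[i + 1 : end]
--             out.append("$" + inner + "$")
--             i = end + 1
--         else:
--             start = i
--             while i < n and s[i] != "$":
--                 i += 1
--             out.append(latex_escape(s[start:i]))
--
--     return "".join(out)
-- ===== SOURCE B (Python) =====
-- _LATEX_MAP = {
--     "&": r"\&",
--     "%": r"\%",
--     "$": r"\$",
--     "#": r"\#",
--     "_": r"\_",
--     "{": r"\{",
--     "}": r"\}",
--     "~": r"\textasciitilde{}",
--     "^": r"\textasciicircum{}",
--     "\\": r"\textbackslash{}",
-- }
--
-- def latex_escape(text: str) -> str: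
--     return "".join(_LATEX_MAP.get(ch, ch) for ch in text)
--
-- def latex_with_math(text: str) -> str:
--     """Single left-to-right pass with an explicit mode/state machine:
--     no lookahead find() calls; unclosed math is flushed escaped at the end."""
--     if text is None:
--         return ""
--     s = str(text)
--     out = []
--     mode = 0   # 0 plain, 1 just saw '$', 4 inside $...$, 2 inside $$...$$, 3 inside $$ after a '$'
--     buf = []
--     for ch in s:
--         if mode == 0:
--             if ch == "$":
--                 out.append(latex_escape("".join(buf)))
--                 buf = []
--                 mode = 1
--             else:
--                 buf.append(ch)
--         elif mode == 1:
--             if ch == "$":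
--                 mode = 2
--             else:
--                 buf = [ch]
--                 mode = 4
--         elif mode == 4:
--             if ch == "$":
--                 out.append("$" + "".join(buf) + "$")
--                 buf = []
--                 mode = 0
--             else:
--                 buf.append(ch)
--         elif mode == 2:
--             if ch == "$":
--                 mode = 3
--             else:
--                 buf.append(ch)
--         else:  # mode 3
--             if ch == "$":
--                 out.append("$$" + "".join(buf) + "$$")
--                 buf = []
--                 mode = 0
--             else:
--                 buf.append("$")
--                 buf.append(ch)
--                 mode = 2
--     if mode == 0:
--         out.append(latex_escape("".join(buf)))
--     elif mode == 1:
--         out.append(latex_escape("$"))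
--     elif mode == 4:
--         out.append(latex_escape("$" + "".join(buf)))
--     elif mode == 2:
--         out.append(latex_escape("$$" + "".join(buf)))
--     else:
--         out.append(latex_escape("$$" + "".join(buf) + "$"))
--     return "".join(out)
-- ===== Notes on version B (the rewrite author's own statement) =====
-- stated objective: alternative
-- what changed: Replaced A's index-advancing scan that uses startswith/find lookahead and slicing with a single left-to-right character pass driven by an explicit mode state machine (plain / seen-$ / in-$..$ / in-$$..$$ / in-$$ after $) that buffers segments and flushes unclosed math escaped at the end.
import Mathlib
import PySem

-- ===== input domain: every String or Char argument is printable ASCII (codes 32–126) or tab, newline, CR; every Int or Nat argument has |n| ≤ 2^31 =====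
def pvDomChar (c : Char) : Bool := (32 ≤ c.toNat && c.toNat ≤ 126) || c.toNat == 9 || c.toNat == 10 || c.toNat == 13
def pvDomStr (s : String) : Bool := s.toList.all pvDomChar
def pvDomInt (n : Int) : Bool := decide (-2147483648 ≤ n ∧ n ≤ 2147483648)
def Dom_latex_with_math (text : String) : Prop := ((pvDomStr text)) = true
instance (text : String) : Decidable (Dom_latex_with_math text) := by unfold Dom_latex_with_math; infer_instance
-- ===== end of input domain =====

-- B replaces A's startswith/find lookahead scan by a single-pass mode/buffer state machine (objective: alternative; return value only).

-- ===== PORT A =====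
-- _LATEX_MAP.get(ch, ch)
def latexMapGet (c : Char) : List Char :=
  if c = '&' then ['\\', '&']
  else if c = '%' then ['\\', '%']
  else if c = '$' then ['\\', '$']
  else if c = '#' then ['\\', '#']
  else if c = '_' then ['\\', '_']
  else if c = '{' then ['\\', '{']
  else if c = '}' then ['\\', '}']
  else if c = '~' then "\\textasciitilde{}".toList
  else if c = '^' then "\\textasciicircum{}".toList
  else if c = '\\' then "\\textbackslash{}".toList
  else [c]

-- latex_escape: "".join(map.get(ch, ch) for ch in text)
def latexEscape (cs : List Char) : List Char := cs.flatMap latexMapGet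

-- s.find("$$", i) relative to the suffix s[i:]: first index of "$$", none = -1
def findDD : List Char → Option Nat
  | a :: b :: r => if a = '$' ∧ b = '$' then some 0 else (findDD (b :: r)).map (· + 1)
  | _ => none

-- s.find("$", i) relative to the suffix s[i:]
def findD : List Char → Option Nat
  | [] => none
  | c :: r => if c = '$' then some 0 else (findD r).map (· + 1)

-- A's while loop over the suffix s[i:]; each branch advances i, i.e. recurses on a shorter suffix
def aloop (cs : List Char) : List Char :=
  match cs with
  | [] => []
  | c :: r =>
    if c = '$' ∧ r.head? = some '$' then
      -- s.startswith("$$", i)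
      let rest := r.tail
      match findDD rest with
      | none => latexEscape cs
      | some e => '$' :: '$' :: (rest.take e) ++ '$' :: '$' :: aloop (rest.drop (e + 2))
    else if c = '$' then
      match findD r with
      | none => latexEscape cs
      | some e => '$' :: (r.take e) ++ '$' :: aloop (r.drop (e + 1))
    else
      -- the inner while collects s[i] (known ≠ '$') and the following non-'$' chars
      latexEscape (c :: r.takeWhile (· ≠ '$')) ++ aloop (r.dropWhile (· ≠ '$'))
termination_by cs.length
decreasing_by
  · simp
  · simp
  · have := List.length_dropWhile_le (fun x => decide (x ≠ '$')) r
    simp at this ⊢; omega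

def latex_with_math (text : String) : String := String.ofList (aloop text.toList)

-- ===== PORT B =====
-- the for-loop of Source B: state = (mode, buf); modes 0 plain, 1 seen '$', 4 in $..$, 2 in $$..$$, 3 in $$ after '$'
def bgo (mode : Nat) (buf : List Char) : List Char → List Char
  | [] =>
    -- the flush after the loop
    if mode = 0 then latexEscape buf
    else if mode = 1 then latexEscape ['$']
    else if mode = 4 then latexEscape ('$' :: buf)
    else if mode = 2 then latexEscape ('$' :: '$' :: buf)
    else latexEscape ('$' :: '$' :: (buf ++ ['$']))
  | c :: r =>
    if mode = 0 then
      if c = '$' then latexEscape buf ++ bgo 1 [] r else bgo 0 (buf ++ [c]) r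
    else if mode = 1 then
      if c = '$' then bgo 2 buf r else bgo 4 [c] r
    else if mode = 4 then
      if c = '$' then '$' :: buf ++ '$' :: bgo 0 [] r else bgo 4 (buf ++ [c]) r
    else if mode = 2 then
      if c = '$' then bgo 3 buf r else bgo 2 (buf ++ [c]) r
    else
      if c = '$' then '$' :: '$' :: buf ++ '$' :: '$' :: bgo 0 [] r
      else bgo 2 (buf ++ ['$', c]) r

def latex_with_math_alt (text : String) : String := String.ofList (bgo 0 [] text.toList)

-- ===== PRECONDITION & SPEC =====
def Spec_latex_with_math (text : String) (out : String) : Prop := out = latex_with_math_alt text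
instance (text : String) (out : String) : Decidable (Spec_latex_with_math text out) := by unfold Spec_latex_with_math; infer_instance

-- ===== CLAIM (what is proved, stated in full; the proofs are below) =====
def Claim_equal_latex_with_math : Prop := ∀ (text : String), Dom_latex_with_math text → Spec_latex_with_math text (latex_with_math text)

-- ===== LEMMAS AND PROOFS =====

theorem latexEscape_append (a b : List Char) :
    latexEscape (a ++ b) = latexEscape a ++ latexEscape b := by
  simp [latexEscape]

-- mode 0: the pending plain buffer can be split off
theorem bgo0_buf (cs : List Char) : ∀ b, bgo 0 b cs = latexEscape b ++ bgo 0 [] cs := by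
  induction cs with
  | nil => intro b; simp [bgo, latexEscape]
  | cons c r ih =>
    intro b
    by_cases hc : c = '$'
    · simp [bgo, hc, latexEscape]
    · simp [bgo, hc]
      rw [ih (b ++ [c]), ih [c], latexEscape_append]
      simp

-- mode 0 consumes a maximal plain span
theorem bgo0_span (cs : List Char) :
    bgo 0 [] cs = latexEscape (cs.takeWhile (· ≠ '$')) ++ bgo 0 [] (cs.dropWhile (· ≠ '$')) := by
  induction cs with
  | nil => simp [latexEscape]
  | cons c r ih =>
    by_cases hc : c = '$'
    · rw [List.takeWhile_cons, List.dropWhile_cons]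
      simp [hc, latexEscape]
    · have hne : (decide (c ≠ '$')) = true := by simp [hc]
      rw [List.takeWhile_cons, List.dropWhile_cons]
      simp only [hne, if_true]
      rw [show bgo 0 [] (c :: r) = bgo 0 [c] r by simp [bgo, hc], bgo0_buf r [c], ih]
      rw [show (c :: r.takeWhile (· ≠ '$')) = [c] ++ r.takeWhile (· ≠ '$') from rfl,
        latexEscape_append]
      simp

-- mode 4 behaves like A's single-$ branch
theorem bgo4_spec (cs : List Char) : ∀ b, bgo 4 b cs =
    match findD cs with
    | none => latexEscape ('$' :: (b ++ cs))
    | some e => '$' :: (b ++ cs.take e) ++ '$' :: bgo 0 [] (cs.drop (e + 1)) := by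
  induction cs with
  | nil => intro b; simp [bgo, findD]
  | cons c r ih =>
    intro b
    by_cases hc : c = '$'
    · simp [bgo, hc, findD]
    · simp only [bgo, findD, hc, reduceIte]
      rw [ih (b ++ [c])]
      cases hf : findD r with
      | none => simp
      | some e => simp [List.take_succ_cons, List.drop_succ_cons]

-- mode 2 behaves like A's $$-branch
theorem findDD_cons_ne (d : Char) (r : List Char) (hd : d ≠ '$') :
    findDD (d :: r) = (findDD r).map (· + 1) := by
  cases r with
  | nil => simp [findDD]
  | cons e r' => simp [findDD, hd]

theorem bgo2_spec (cs : List Char) : ∀ b, bgo 2 b cs =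
    match findDD cs with
    | none => latexEscape ('$' :: '$' :: (b ++ cs))
    | some e => '$' :: '$' :: (b ++ cs.take e) ++ '$' :: '$' :: bgo 0 [] (cs.drop (e + 2)) := by
  match cs with
  | [] => intro b; simp [bgo, findDD]
  | [c] =>
    intro b
    by_cases hc : c = '$'
    · simp [bgo, hc, findDD]
    · simp [bgo, hc, findDD]
  | c :: d :: r =>
    intro b
    by_cases hc : c = '$'
    · subst hc
      by_cases hd : d = '$'
      · subst hd
        simp [bgo, findDD]
      · rw [show bgo 2 b ('$' :: d :: r) = bgo 2 (b ++ ['$', d]) r by simp [bgo, hd]]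
        rw [bgo2_spec r (b ++ ['$', d])]
        rw [show findDD ('$' :: d :: r) = (findDD (d :: r)).map (· + 1) by simp [findDD, hd]]
        rw [findDD_cons_ne d r hd]
        cases hf : findDD r with
        | none => simp
        | some e =>
          have h2 : e + 1 + 1 + 2 = e + 1 + 1 + 1 + 1 := by omega
          have h3 : e + 2 = e + 1 + 1 := by omega
          simp only [Option.map_some, h2, h3, List.take_succ_cons, List.drop_succ_cons]
          simp
    · rw [show bgo 2 b (c :: d :: r) = bgo 2 (b ++ [c]) (d :: r) by simp [bgo, hc]]
      rw [bgo2_spec (d :: r) (b ++ [c])]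
      rw [findDD_cons_ne c (d :: r) hc]
      cases hf : findDD (d :: r) with
      | none => simp
      | some e =>
        have h2 : e + 1 + 2 = e + 2 + 1 := by omega
        simp only [Option.map_some, h2, List.take_succ_cons, List.drop_succ_cons]
        simp
termination_by cs.length

-- main loop equivalence
theorem findD_cons_ne (c : Char) (r : List Char) (hc : c ≠ '$') :
    findD (c :: r) = (findD r).map (· + 1) := by
  simp [findD, hc]

theorem aloop_eq_bgo (cs : List Char) : aloop cs = bgo 0 [] cs := by
  match cs with
  | [] => simp [aloop, bgo, latexEscape]
  | c :: r =>
    by_cases hc : c = '$'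
    · subst hc
      match r with
      | [] =>
        simp [aloop, bgo, findD, latexEscape]
      | d :: r' =>
        by_cases hd : d = '$'
        · subst hd
          rw [show bgo 0 [] ('$' :: '$' :: r') = bgo 2 [] r' by simp [bgo, latexEscape]]
          rw [bgo2_spec r' []]
          rw [show aloop ('$' :: '$' :: r') = (match findDD r' with
            | none => latexEscape ('$' :: '$' :: r')
            | some e => '$' :: '$' :: (r'.take e) ++ '$' :: '$' :: aloop (r'.drop (e + 2)))
            by rw [aloop]; simp]
          cases hf : findDD r' with
          | none => simp
          | some e =>
            have := aloop_eq_bgo (r'.drop (e + 2))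
            simp [this]
        · rw [show bgo 0 [] ('$' :: d :: r') = bgo 4 [d] r' by simp [bgo, latexEscape, hd]]
          rw [bgo4_spec r' [d]]
          rw [show aloop ('$' :: d :: r') = (match findD (d :: r') with
            | none => latexEscape ('$' :: d :: r')
            | some e => '$' :: ((d :: r').take e) ++ '$' :: aloop ((d :: r').drop (e + 1)))
            by rw [aloop]; simp [hd]]
          rw [findD_cons_ne d r' hd]
          cases hf : findD r' with
          | none => simp
          | some e =>
            have := aloop_eq_bgo (r'.drop (e + 1))
            have h2 : e + 1 + 1 = e + 2 := by omega
            simp [this, h2, List.take_succ_cons, List.drop_succ_cons]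
    · rw [show aloop (c :: r)
          = latexEscape (c :: r.takeWhile (· ≠ '$')) ++ aloop (r.dropWhile (· ≠ '$'))
          by rw [aloop]; simp [hc]]
      rw [show bgo 0 [] (c :: r) = bgo 0 [c] r by simp [bgo, hc], bgo0_buf r [c], bgo0_span r]
      have := aloop_eq_bgo (r.dropWhile (· ≠ '$'))
      rw [this]
      rw [show (c :: r.takeWhile (· ≠ '$')) = [c] ++ r.takeWhile (· ≠ '$') from rfl,
        latexEscape_append]
      simp
termination_by cs.length
decreasing_by
  · simp; omega
  · simp; omega
  · have := List.length_dropWhile_le (fun x => decide (x ≠ '$')) r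
    simp at this ⊢; omega

-- ===== VERDICT (by name: the statement is the Claim_ definition above) =====
theorem latex_with_math_spec : Claim_equal_latex_with_math := by
  intro text _
  show latex_with_math text = latex_with_math_alt text
  unfold latex_with_math latex_with_math_alt
  rw [aloop_eq_bgo]
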